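-- pv_equiv track=rewrite | github.com/thaines/rfam | bin/prman_AlfParser.py | __matchBracket
-- ===== SOURCE A (Python) =====
-- def __matchBracket(str):
--     if str[0] != '{':
--         return None
--     num_open = 0
--     for i, c in enumerate(str):
--         if c == '{':
--             num_open += 1
--         elif c == '}':
--             num_open -= 1
--
--         if num_open == 0:
--             return str[1:i]
--     return None
-- ===== SOURCE B (Python) =====
-- def __matchBracket(str):
--     # Hop from brace to brace with str.find instead of scanning every character.
--     if not str.startswith('{'):
--         return None
--     depth = 0
--     i = 0
--     while True:
--         o = str.find('{', i)
--         c = str.find('}', i)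
--         if c == -1:
--             return None
--         if o != -1 and o < c:
--             depth += 1
--             i = o + 1
--         else:
--             depth -= 1
--             i = c + 1
--             if depth == 0:
--                 return str[1:c]
-- ===== Notes on version B (the rewrite author's own statement) =====
-- stated objective: alternative
-- what changed: Instead of enumerating every character while updating a depth counter, B hops directly from brace to brace using str.find('{', i) / str.find('}', i), adjusting the depth only at braces and returning str[1:c] when the depth returns to zero.
import Mathlib
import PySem

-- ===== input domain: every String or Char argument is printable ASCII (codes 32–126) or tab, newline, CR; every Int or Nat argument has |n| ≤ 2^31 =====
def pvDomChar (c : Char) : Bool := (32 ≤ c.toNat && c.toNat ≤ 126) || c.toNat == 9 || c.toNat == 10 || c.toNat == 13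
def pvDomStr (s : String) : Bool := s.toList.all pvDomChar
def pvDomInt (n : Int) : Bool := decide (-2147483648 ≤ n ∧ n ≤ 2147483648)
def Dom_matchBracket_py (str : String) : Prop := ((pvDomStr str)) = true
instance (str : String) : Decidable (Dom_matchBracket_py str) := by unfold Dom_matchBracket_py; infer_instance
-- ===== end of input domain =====

-- B hops from brace to brace with str.find('{',i)/str.find('}',i) instead of scanning every
-- character with enumerate; same return value, including str[1:c] at the matching close brace.
-- ===== PORT A =====
-- the for-loop of A: enumerate(str) with num_open, early return of the index where num_open hits 0
def matchBracketScan : List Char → Nat → Int → Option Nat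
  | [], _, _ => none
  | c :: rest, i, numOpen =>
    let n2 : Int := if c = '{' then numOpen + 1 else if c = '}' then numOpen - 1 else numOpen
    if n2 = 0 then some i else matchBracketScan rest (i + 1) n2

def matchBracket_py (str : String) : Option String :=
  match PySem.Str.pyGet? str 0 with
  | none => none            -- str[0] raises IndexError on ""; excluded by Pre_
  | some c0 =>
    if c0 ≠ '{' then none
    else
      match matchBracketScan str.toList 0 0 with
      | some i => some (PySem.Str.slice str (some 1) (some (i : Int)))   -- str[1:i]
      | none => none

-- ===== PORT B =====
-- the while-loop of B: o/c are str.find('{', i) / str.find('}', i); on the close branch the loop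
-- returns the closing index c (the wrapper slices str[1:c]).  fuel only makes the recursion
-- structural: each step moves i strictly forward, so length+1 steps are never exhausted.
def matchBracketHop (cs : List Char) (depth : Int) (i : Nat) : Nat → Option Nat
  | 0 => none
  | fuel + 1 =>
    let o := PySem.Chars.findFrom cs ['{'] (i : Int)
    let c := PySem.Chars.findFrom cs ['}'] (i : Int)
    if c = -1 then none
    else if o ≠ -1 ∧ o < c then matchBracketHop cs (depth + 1) (o.toNat + 1) fuel
    else if depth - 1 = 0 then some c.toNat
    else matchBracketHop cs (depth - 1) (c.toNat + 1) fuel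

def matchBracket_py_alt (str : String) : Option String :=
  if PySem.Str.startswith str "{" then
    match matchBracketHop str.toList 0 0 (str.toList.length + 1) with
    | some c => some (PySem.Str.slice str (some 1) (some (c : Int)))   -- str[1:c]
    | none => none
  else none

-- ===== PRECONDITION & SPEC =====
-- Pre_ excludes only the empty string, on which A raises IndexError at str[0].
def Pre_matchBracket_py (str : String) : Prop := str ≠ ""
instance (str : String) : Decidable (Pre_matchBracket_py str) := by unfold Pre_matchBracket_py; infer_instance
def pvWitness_matchBracket_py : String := "{ab{c}d}"

def Spec_matchBracket_py (str : String) (out : Option String) : Prop := out = matchBracket_py_alt str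
instance (str : String) (out : Option String) : Decidable (Spec_matchBracket_py str out) := by unfold Spec_matchBracket_py; infer_instance

-- ===== CLAIM (what is proved, stated in full; the proofs are below) =====
def Claim_equal_matchBracket_py : Prop := ∀ (str : String), Dom_matchBracket_py str → Pre_matchBracket_py str → Spec_matchBracket_py str (matchBracket_py str)

-- ===== LEMMAS AND PROOFS =====

lemma singleton_prefix_cons {ch x : Char} {t : List Char} (h : [ch] <+: (x :: t)) : x = ch := by
  rcases h with ⟨u, hu⟩
  simpa using congrArg List.head? hu.symm

lemma find_singleton_cons_ne {x ch : Char} (rest : List Char) (hx : x ≠ ch) :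
    PySem.Chars.find (x :: rest) [ch] =
      if PySem.Chars.find rest [ch] = -1 then -1 else 1 + PySem.Chars.find rest [ch] := by
  by_cases h : PySem.Chars.find rest [ch] = -1
  · -- ch not in rest, not equal x → not in x::rest
    have hmem : ch ∉ rest := by
      have := (PySem.Chars.find_eq_neg_one_iff rest [ch]).mp h
      simpa [List.singleton_infix_iff] using this
    have : ch ∉ x :: rest := by simp [hx.symm, hmem]
    rw [if_pos h, (PySem.Chars.find_eq_neg_one_iff _ _).mpr]
    simpa [List.singleton_infix_iff] using this
  · rw [if_neg h]
    have hinf : [ch] <:+: rest := (PySem.Chars.find_ne_neg_one_iff rest [ch]).mp h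
    have hf0 : 0 ≤ PySem.Chars.find rest [ch] := (PySem.Chars.find_nonneg_iff _ _).mpr hinf
    rcases PySem.Chars.find_spec hf0 with ⟨hpre, hmin⟩
    have hinf2 : [ch] <:+: (x :: rest) := hinf.trans (List.suffix_cons x rest).isInfix -- check
    have hg0 : 0 ≤ PySem.Chars.find (x :: rest) [ch] := (PySem.Chars.find_nonneg_iff _ _).mpr hinf2
    rcases PySem.Chars.find_spec hg0 with ⟨gpre, gmin⟩
    set f := PySem.Chars.find rest [ch] with hfdef
    set g := PySem.Chars.find (x :: rest) [ch] with hgdef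
    -- show g = 1 + f
    have hdropg : (x :: rest).drop (f.toNat + 1) = rest.drop f.toNat := by simp
    have key : g.toNat = f.toNat + 1 := by
      rcases lt_trichotomy g.toNat (f.toNat + 1) with hlt | heq | hgt
      · exfalso
        rcases Nat.eq_zero_or_pos g.toNat with h0 | hpos
        · rw [h0] at gpre
          exact hx (singleton_prefix_cons (t := rest) (by simpa using gpre))
        · obtain ⟨k, hk⟩ : ∃ k, g.toNat = k + 1 := ⟨g.toNat - 1, by omega⟩
          rw [hk] at gpre
          exact hmin k (by omega) (by simpa using gpre)
      · exact heq
      · exfalso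
        exact gmin (f.toNat + 1) hgt (by rw [hdropg]; exact hpre)
    omega

lemma find_singleton_cons_self (ch : Char) (rest : List Char) :
    PySem.Chars.find (ch :: rest) [ch] = 0 := by
  have hinf : [ch] <:+: (ch :: rest) := by
    simpa [List.singleton_infix_iff] using (List.mem_cons_self : ch ∈ ch :: rest)
  have h0 : 0 ≤ PySem.Chars.find (ch :: rest) [ch] :=
    (PySem.Chars.find_nonneg_iff _ _).mpr hinf
  rcases PySem.Chars.find_spec h0 with ⟨_, hmin⟩
  by_contra hne
  have hpos : 0 < (PySem.Chars.find (ch :: rest) [ch]).toNat := by omega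
  exact hmin 0 hpos (List.prefix_iff_eq_take.mpr rfl)

lemma drop_len_lt {cs rest : List Char} {x : Char} {i : Nat} (h : cs.drop i = x :: rest) :
    i < cs.length := by
  have := congrArg List.length h
  simp at this; omega

lemma hop_find_cons_self {cs rest : List Char} {ch : Char} {i : Nat}
    (h : cs.drop i = ch :: rest) :
    PySem.Chars.findFrom cs [ch] (i : Int) = (i : Int) := by
  have hi : i ≤ cs.length := le_of_lt (drop_len_lt h)
  rw [PySem.Chars.findFrom_natCast cs [ch] i hi, h, find_singleton_cons_self]
  norm_num

lemma hop_find_cons_ne {cs rest : List Char} {x ch : Char} {i : Nat}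
    (h : cs.drop i = x :: rest) (hx : x ≠ ch) :
    PySem.Chars.findFrom cs [ch] (i : Int) = PySem.Chars.findFrom cs [ch] ((i + 1 : Nat) : Int) := by
  have hi : i < cs.length := drop_len_lt h
  have hdrop1 : cs.drop (i + 1) = rest := by
    have := congrArg (List.drop 1) h
    simpa [List.drop_drop, Nat.add_comm] using this
  rw [PySem.Chars.findFrom_natCast cs [ch] i (le_of_lt hi),
      PySem.Chars.findFrom_natCast cs [ch] (i + 1) (by omega),
      h, hdrop1, find_singleton_cons_ne rest hx]
  by_cases hr : PySem.Chars.find rest [ch] = -1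
  · simp [hr]
  · have : ¬(1 + PySem.Chars.find rest [ch] = -1) := by
      have := (PySem.Chars.find_nonneg_iff rest [ch]).mpr ((PySem.Chars.find_ne_neg_one_iff rest [ch]).mp hr)
      omega
    simp [hr, this]
    ring

lemma drop_succ_of_drop_cons {cs rest : List Char} {x : Char} {i : Nat}
    (h : cs.drop i = x :: rest) : cs.drop (i + 1) = rest := by
  have := congrArg (List.drop 1) h
  simpa [List.drop_drop, Nat.add_comm] using this

lemma hop_find_none {cs : List Char} {ch : Char} {i : Nat} (h : i ≤ cs.length) :
    PySem.Chars.findFrom cs [ch] (i : Int) = -1 ↔ ch ∉ cs.drop i := by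
  rw [PySem.Chars.findFrom_natCast_eq_neg_one_iff cs [ch] i h]
  simp [List.singleton_infix_iff]

lemma scan_no_close : ∀ (l : List Char) (i : Nat) (depth : Int),
    1 ≤ depth → '}' ∉ l → matchBracketScan l i depth = none := by
  intro l
  induction l with
  | nil => intro i depth _ _; rfl
  | cons c rest ih =>
    intro i depth hd hmem
    have hc : c ≠ '}' := fun h => hmem (h ▸ List.mem_cons_self)
    have hrest : '}' ∉ rest := fun h => hmem (List.mem_cons_of_mem _ h)
    have hn2 : (if c = '{' then depth + 1 else if c = '}' then depth - 1 else depth) = depth + 1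
        ∨ (if c = '{' then depth + 1 else if c = '}' then depth - 1 else depth) = depth := by
      by_cases hco : c = '{' <;> simp [hco, hc]
    simp only [matchBracketScan]
    rcases hn2 with h2 | h2 <;> rw [h2] <;> rw [if_neg (by omega)]
    · exact ih (i+1) (depth+1) (by omega) hrest
    · exact ih (i+1) depth hd hrest

lemma hop_eq_scan (cs : List Char) : ∀ (n i : Nat) (depth : Int) (fuel : Nat),
    cs.length - i = n → i ≤ cs.length → cs.length - i < fuel → 1 ≤ depth →
    matchBracketHop cs depth i fuel = matchBracketScan (cs.drop i) i depth := by
  intro n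
  induction n using Nat.strong_induction_on with
  | _ n IH =>
    intro i depth fuel hn hi hfuel hd
    obtain ⟨f, rfl⟩ : ∃ f, fuel = f + 1 := ⟨fuel - 1, by omega⟩
    rcases hdrop : cs.drop i with _ | ⟨x, rest⟩
    · -- i = length: no '}' at or after i
      have hc : PySem.Chars.findFrom cs ['}'] (i : Int) = -1 :=
        (hop_find_none hi).mpr (by rw [hdrop]; simp)
      simp only [matchBracketHop, hc, matchBracketScan]
      simp
    · have hilt : i < cs.length := drop_len_lt hdrop
      have hdrop1 : cs.drop (i + 1) = rest := drop_succ_of_drop_cons hdrop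
      by_cases hx1 : x = '{'
      · subst hx1
        have ho : PySem.Chars.findFrom cs ['{'] (i : Int) = (i : Int) := hop_find_cons_self hdrop
        have hcstep : PySem.Chars.findFrom cs ['}'] (i : Int)
            = PySem.Chars.findFrom cs ['}'] ((i + 1 : Nat) : Int) :=
          hop_find_cons_ne hdrop (by decide)
        have hR : matchBracketScan ('{' :: rest) i depth
            = matchBracketScan rest (i + 1) (depth + 1) := by
          simp only [matchBracketScan, reduceIte]
          rw [if_neg (show ¬(depth + 1 = 0) by omega)]
        by_cases hc : PySem.Chars.findFrom cs ['}'] (i : Int) = -1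
        · have hnomem : '}' ∉ rest := by
            have h1 : ('}':Char) ∉ cs.drop i := (hop_find_none hi).mp hc
            rw [hdrop] at h1
            exact fun h => h1 (List.mem_cons_of_mem _ h)
          rw [hR, scan_no_close rest (i+1) (depth+1) (by omega) hnomem]
          simp only [matchBracketHop, hc]
          simp
        · have hcge : ((i:Int) + 1) ≤ PySem.Chars.findFrom cs ['}'] (i : Int) := by
            rw [hcstep]
            have := PySem.Chars.findFrom_natCast_spec cs ['}'] (i+1) (by omega) (by rw [← hcstep]; exact hc)
            push_cast at this ⊢
            omega
          have hL : matchBracketHop cs depth i (f + 1)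
              = matchBracketHop cs (depth + 1) (i + 1) f := by
            simp only [matchBracketHop, ho]
            rw [if_neg hc, if_pos ⟨show ¬((i:Int) = -1) by omega, by omega⟩]
            simp only [Int.toNat_natCast]
          rw [hL, hR]
          rw [← hdrop1]
          exact IH (cs.length - (i+1)) (by omega) (i+1) (depth+1) f rfl (by omega) (by omega) (by omega)
      · by_cases hx2 : x = '}'
        · subst hx2
          have hc : PySem.Chars.findFrom cs ['}'] (i : Int) = (i : Int) := hop_find_cons_self hdrop
          have hostep : PySem.Chars.findFrom cs ['{'] (i : Int)
              = PySem.Chars.findFrom cs ['{'] ((i + 1 : Nat) : Int) :=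
            hop_find_cons_ne hdrop (by decide)
          have hcond : ¬(PySem.Chars.findFrom cs ['{'] (i : Int) ≠ -1 ∧
              PySem.Chars.findFrom cs ['{'] (i : Int) < PySem.Chars.findFrom cs ['}'] (i : Int)) := by
            rintro ⟨hne, hlt⟩
            have := PySem.Chars.findFrom_natCast_spec cs ['{'] (i+1) (by omega) (by rw [← hostep]; exact hne)
            rw [hc, hostep] at hlt
            push_cast at this hlt
            omega
          have hL : matchBracketHop cs depth i (f + 1)
              = if depth - 1 = 0 then some i else matchBracketHop cs (depth - 1) (i + 1) f := by
            simp only [matchBracketHop]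
            rw [if_neg (by rw [hc]; omega), if_neg hcond, hc]
            simp only [Int.toNat_natCast]
          have hR : matchBracketScan ('}' :: rest) i depth
              = if depth - 1 = 0 then some i
                else matchBracketScan rest (i + 1) (depth - 1) := by
            simp only [matchBracketScan, reduceIte]
            rw [if_neg (show ¬(('}':Char) = '{') by decide)]
          rw [hL, hR]
          by_cases hz : depth - 1 = 0
          · rw [if_pos hz, if_pos hz]
          · rw [if_neg hz, if_neg hz, ← hdrop1]
            exact IH (cs.length - (i+1)) (by omega) (i+1) (depth-1) f rfl (by omega) (by omega) (by omega)
        · have ho : PySem.Chars.findFrom cs ['{'] (i : Int)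
              = PySem.Chars.findFrom cs ['{'] ((i + 1 : Nat) : Int) := hop_find_cons_ne hdrop hx1
          have hc : PySem.Chars.findFrom cs ['}'] (i : Int)
              = PySem.Chars.findFrom cs ['}'] ((i + 1 : Nat) : Int) := hop_find_cons_ne hdrop hx2
          have hstep : matchBracketHop cs depth i (f + 1)
              = matchBracketHop cs depth (i + 1) (f + 1) := by
            simp only [matchBracketHop]
            rw [ho, hc]
          have hR : matchBracketScan (x :: rest) i depth
              = matchBracketScan rest (i + 1) depth := by
            simp only [matchBracketScan]
            rw [if_neg hx1, if_neg hx2, if_neg (by omega)]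
          rw [hstep, hR, ← hdrop1]
          exact IH (cs.length - (i+1)) (by omega) (i+1) depth (f+1) rfl (by omega) (by omega) hd

lemma hop_eq_scan_top (rest : List Char) :
    matchBracketHop ('{' :: rest) 0 0 (('{' :: rest).length + 1)
      = matchBracketScan ('{' :: rest) 0 0 := by
  set cs := '{' :: rest with hcs
  have hdrop : cs.drop 0 = '{' :: rest := rfl
  have hdrop1 : cs.drop 1 = rest := rfl
  have hlen : cs.length = rest.length + 1 := by simp [hcs]
  have ho : PySem.Chars.findFrom cs ['{'] ((0:Nat) : Int) = ((0:Nat) : Int) :=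
    hop_find_cons_self hdrop
  have hcstep : PySem.Chars.findFrom cs ['}'] ((0:Nat) : Int)
      = PySem.Chars.findFrom cs ['}'] ((1:Nat) : Int) :=
    hop_find_cons_ne hdrop (by decide)
  have hscan : matchBracketScan cs 0 0 = matchBracketScan rest 1 1 := by
    simp only [hcs, matchBracketScan, reduceIte]
    norm_num
  by_cases hc : PySem.Chars.findFrom cs ['}'] ((0:Nat) : Int) = -1
  · have hnomem : '}' ∉ rest := by
      have h1 : ('}':Char) ∉ cs.drop 0 := (hop_find_none (by omega)).mp hc
      rw [hdrop] at h1
      exact fun h => h1 (List.mem_cons_of_mem _ h)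
    rw [hscan, scan_no_close rest 1 1 (by omega) hnomem]
    obtain ⟨f, hf⟩ : ∃ f, cs.length + 1 = f + 1 := ⟨cs.length, rfl⟩
    rw [hf]
    simp only [matchBracketHop]
    norm_num at hc ⊢
    simp [hc]
  · have hcge : ((1:Nat) : Int) ≤ PySem.Chars.findFrom cs ['}'] ((0:Nat) : Int) := by
      rw [hcstep]
      have := PySem.Chars.findFrom_natCast_spec cs ['}'] 1 (by omega) (by rw [← hcstep]; exact hc)
      push_cast at this ⊢
      omega
    obtain ⟨f, hf⟩ : ∃ f, cs.length + 1 = f + 1 := ⟨cs.length, rfl⟩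
    have hL : matchBracketHop cs 0 0 (f + 1) = matchBracketHop cs 1 1 f := by
      simp only [matchBracketHop, ho]
      rw [if_neg (by push_cast at hc ⊢; exact hc), if_pos ⟨by omega, by push_cast at hcge ⊢; omega⟩]
      norm_num
    have : (f : Nat) = cs.length := by omega
    rw [hf, hL, hscan, ← hdrop1]
    exact hop_eq_scan cs (cs.length - 1) 1 1 f rfl (by omega) (by omega) (by omega)

-- ===== VERDICT (by name: the statement is the Claim_ definition above) =====
theorem matchBracket_py_spec : Claim_equal_matchBracket_py := by
  intro str _ hpre
  unfold Spec_matchBracket_py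
  have hsw : PySem.Str.startswith str "{" = PySem.Chars.startswith str.toList ['{'] := by
    rw [PySem.Str.startswith_eq]; rfl
  have hget : PySem.Str.pyGet? str 0 = PySem.List.pyGet? str.toList 0 := by
    simp [pysem]
  rcases hcs : str.toList with _ | ⟨c0, rest⟩
  · -- excluded by Pre_: the empty string (A raises IndexError at str[0])
    exact absurd (String.toList_eq_nil_iff.mp hcs) hpre
  · by_cases hc0 : c0 = '{'
    · subst hc0
      have hswt : PySem.Chars.startswith ('{' :: rest) ['{'] = true := by
        rw [PySem.Chars.startswith_iff]
        exact ⟨rest, rfl⟩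
      simp only [matchBracket_py, matchBracket_py_alt, hget, hcs, hsw, hswt,
        PySem.List.pyGet?_zero_cons, if_true]
      rw [hop_eq_scan_top rest]
      simp
    · have hswf : PySem.Chars.startswith (c0 :: rest) ['{'] = false := by
        rw [Bool.eq_false_iff]
        intro h
        exact hc0 (singleton_prefix_cons ((PySem.Chars.startswith_iff _ _).mp h))
      simp [matchBracket_py, matchBracket_py_alt, hget, hcs, hsw, hswf,
        PySem.List.pyGet?_zero_cons, hc0]
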